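-- pv_equiv track=rewrite | github.com/NSVEGUR/human-centric-artificial-intelligence | project1/views.py | _page_range
-- ===== SOURCE A (Python) =====
-- def _page_range(current, total, window=2):
--     """Generate page range for pagination with ellipsis"""
--     # If total pages is small, show all
--     if total <= 7:
--         return list(range(1, total + 1))
--
--     # Otherwise, show first, last, and pages around current
--     pages = set([1, total])
--
--     # Add pages around current page
--     for p in range(max(1, current - window), min(total, current + window) + 1):
--         pages.add(p)
--
--     # Build result list with None for ellipsis
--     result = []
--     for p in sorted(pages):
--         if result and p - result[-1] > 1:
--             result.append(None)  # This will be rendered as ellipsis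
--         result.append(p)
--
--     return result
-- ===== SOURCE B (Python) =====
-- def _page_range(current, total, window=2):
--     """Generate page range for pagination with ellipsis"""
--     if total <= 7:
--         return list(range(1, total + 1))
--     lo = max(1, current - window)
--     hi = min(total, current + window)
--     # interior part of the window, clamped away from the first and last page
--     mlo = max(lo, 2)
--     mhi = min(hi, total - 1)
--     result = [1]
--     if mlo <= mhi:
--         if mlo > 2:
--             result.append(None)
--         result.extend(range(mlo, mhi + 1))
--         if mhi < total - 1:
--             result.append(None)
--     else:
--         result.append(None)
--     result.append(total)
--     return result
-- ===== Notes on version B (the rewrite author's own statement) =====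
-- stated objective: simpler
-- what changed: B replaces A's set-accumulate + sort + gap-scanning fold by a direct construction from the clamped window bounds: emit 1, an optional ellipsis, the interior window range, an optional ellipsis, then the last page.
import Mathlib
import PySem

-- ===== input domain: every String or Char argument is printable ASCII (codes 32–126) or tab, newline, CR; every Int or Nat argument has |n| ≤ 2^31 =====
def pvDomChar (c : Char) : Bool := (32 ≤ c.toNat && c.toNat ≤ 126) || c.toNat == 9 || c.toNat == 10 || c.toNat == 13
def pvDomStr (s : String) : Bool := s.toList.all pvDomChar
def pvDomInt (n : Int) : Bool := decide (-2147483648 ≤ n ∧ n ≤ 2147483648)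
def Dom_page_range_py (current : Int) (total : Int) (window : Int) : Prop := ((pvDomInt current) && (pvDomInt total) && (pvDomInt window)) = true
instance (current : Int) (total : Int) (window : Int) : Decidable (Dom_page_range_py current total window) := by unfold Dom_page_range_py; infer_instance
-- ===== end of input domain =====

-- B builds the page list directly from the clamped window bounds (no set, no sort, no gap fold): same values, simpler decomposition.

-- ===== PORT A =====
-- one step of A's result-building loop; result[-1] is read with pyGet? (-1); at this point in A's
-- loop result[-1] is always an int page (never None), so the inner .getD 0 is never taken
def pvAStep (result : List (Option Int)) (p : Int) : List (Option Int) :=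
  let result :=
    if (!result.isEmpty) && decide (p - (((PySem.List.pyGet? result (-1)).getD none).getD 0) > 1)
    then result ++ [none] else result
  result ++ [some p]

def page_range_py (current : Int) (total : Int) (window : Int) : List (Option Int) :=
  if total ≤ 7 then
    (PySem.List.pyRange 1 (total + 1) 1).map some
  else
    let pages : PySem.Set Int := PySem.Set.ofList [1, total]
    let pages :=
      (PySem.List.pyRange (max 1 (current - window)) (min total (current + window) + 1) 1).foldl
        PySem.Set.add pages
    (PySem.List.sorted pages (fun x => x) false).foldl pvAStep []

-- ===== PORT B =====
def page_range_py_alt (current : Int) (total : Int) (window : Int) : List (Option Int) :=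
  if total ≤ 7 then
    (PySem.List.pyRange 1 (total + 1) 1).map some
  else
    let lo := max 1 (current - window)
    let hi := min total (current + window)
    let mlo := max lo 2
    let mhi := min hi (total - 1)
    let result : List (Option Int) := [some 1]
    let result :=
      if mlo ≤ mhi then
        ((result ++ (if 2 < mlo then [none] else []))
          ++ (PySem.List.pyRange mlo (mhi + 1) 1).map some)
          ++ (if mhi < total - 1 then [none] else [])
      else result ++ [none]
    result ++ [some total]

-- ===== PRECONDITION & SPEC =====
def Spec_page_range_py (current : Int) (total : Int) (window : Int) (out : List (Option Int)) : Prop := out = page_range_py_alt current total window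
instance (current : Int) (total : Int) (window : Int) (out : List (Option Int)) : Decidable (Spec_page_range_py current total window out) := by unfold Spec_page_range_py; infer_instance

-- ===== CLAIM (what is proved, stated in full; the proofs are below) =====
def Claim_equal_page_range_py : Prop := ∀ (current : Int) (total : Int) (window : Int), Dom_page_range_py current total window → Spec_page_range_py current total window (page_range_py current total window)

-- ===== LEMMAS AND PROOFS =====

-- folding A's gap step over a contiguous range: at most one leading None
theorem pvAStep_fold_range (n : Nat) : ∀ (a b : Int), (b - a).toNat = n →
    ∀ (r : List (Option Int)) (q : Int), r.getLast? = some (some q) →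
      (PySem.List.pyRange a b 1).foldl pvAStep r =
        (r ++ (if a < b ∧ a - q > 1 then [none] else []))
          ++ (PySem.List.pyRange a b 1).map some := by
  induction n with
  | zero =>
    intro a b h r q hq
    rw [PySem.List.pyRange_one_eq_nil (by omega)]
    have hno : ¬ (a < b ∧ a - q > 1) := by omega
    simp [hno]
  | succ n ih =>
    intro a b h r q hq
    have hab : a < b := by omega
    have hr : r ≠ [] := by intro hx; subst hx; simp at hq
    have hstep : pvAStep r a = (r ++ (if a - q > 1 then [none] else [])) ++ [some a] := by
      simp [pvAStep, PySem.List.pyGet?_neg_one, hq, hr]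
      split_ifs <;> simp
    have hlast : (pvAStep r a).getLast? = some (some a) := by rw [hstep]; simp
    rw [PySem.List.pyRange_one_cons hab, List.foldl_cons,
        ih (a + 1) b (by omega) _ a hlast, hstep]
    have h1 : ¬ ((a : Int) + 1 - a > 1) := by omega
    simp [hab]

-- the sorted page set, named explicitly
theorem pv_sorted_pages (current total window : Int) (h8 : ¬ total ≤ 7) :
    PySem.List.sorted
      ((PySem.List.pyRange (max 1 (current - window)) (min total (current + window) + 1) 1).foldl
        PySem.Set.add (PySem.Set.ofList [1, total])) (fun x => x) false =
      if max (max 1 (current - window)) 2 ≤ min (min total (current + window)) (total - 1) then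
        1 :: (PySem.List.pyRange (max (max 1 (current - window)) 2)
               (min (min total (current + window)) (total - 1) + 1) 1 ++ [total])
      else [1, total] := by
  set lo := max 1 (current - window) with hlo
  set hi := min total (current + window) with hhi
  set mlo := max lo 2 with hmlo
  set mhi := min hi (total - 1) with hmhi
  have hfold : (PySem.List.pyRange lo (hi + 1) 1).foldl PySem.Set.add (PySem.Set.ofList [1, total])
      = PySem.Set.ofList ([1, total] ++ PySem.List.pyRange lo (hi + 1) 1) :=
    (PySem.Set.ofList_append _ _).symm
  rw [hfold]
  split_ifs with hm
  · have hpw : (1 :: (PySem.List.pyRange mlo (mhi + 1) 1 ++ [total])).Pairwise (· < ·) := by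
      refine List.pairwise_cons.mpr ⟨?_, List.pairwise_append.mpr
        ⟨PySem.List.pairwise_lt_pyRange_one _ _, by simp, ?_⟩⟩
      · intro y hy
        rcases List.mem_append.mp hy with h | h
        · rw [PySem.List.mem_pyRange_one] at h; omega
        · simp at h; omega
      · intro y hy z hz
        rw [PySem.List.mem_pyRange_one] at hy; simp at hz; omega
    refine PySem.List.sorted_eq_of_perm_of_pairwise_lt _ _ _ ?_ hpw
    rw [List.perm_ext_iff_of_nodup (hpw.imp fun h => ne_of_lt h) (PySem.Set.nodup_ofList _)]
    intro x
    rw [PySem.Set.mem_ofList]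
    simp only [List.mem_cons, List.mem_append, PySem.List.mem_pyRange_one, List.not_mem_nil,
      or_false]
    omega
  · have hpw : ([1, total] : List Int).Pairwise (· < ·) := by simp; omega
    refine PySem.List.sorted_eq_of_perm_of_pairwise_lt _ _ _ ?_ hpw
    rw [List.perm_ext_iff_of_nodup (hpw.imp fun h => ne_of_lt h) (PySem.Set.nodup_ofList _)]
    intro x
    rw [PySem.Set.mem_ofList]
    simp only [List.mem_cons, List.mem_append, PySem.List.mem_pyRange_one, List.not_mem_nil,
      or_false]
    omega

-- ===== VERDICT (by name: the statement is the Claim_ definition above) =====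
theorem page_range_py_spec : Claim_equal_page_range_py := by
  intro current total window _
  unfold Spec_page_range_py page_range_py page_range_py_alt
  by_cases h7 : total ≤ 7
  · simp [h7]
  · simp only [h7, if_false]
    rw [pv_sorted_pages current total window h7]
    set lo := max 1 (current - window) with hlo
    set hi := min total (current + window) with hhi
    set mlo := max lo 2 with hmlo
    set mhi := min hi (total - 1) with hmhi
    have h1 : pvAStep [] 1 = [some 1] := by simp [pvAStep]
    by_cases hm : mlo ≤ mhi
    · -- nonempty middle block
      rw [if_pos hm, if_pos hm, List.foldl_cons, h1, List.foldl_append]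
      have hmid := pvAStep_fold_range ((mhi + 1) - mlo).toNat mlo (mhi + 1) rfl [some 1] 1
        (by simp)
      rw [hmid]
      set mid := ([some 1] ++ (if mlo < mhi + 1 ∧ mlo - 1 > 1 then [none] else []))
          ++ (PySem.List.pyRange mlo (mhi + 1) 1).map some with hmiddef
      have hsplit : PySem.List.pyRange mlo (mhi + 1) 1
          = PySem.List.pyRange mlo mhi 1 ++ [mhi] :=
        PySem.List.pyRange_one_succ_right (by omega)
      have hlast : mid.getLast? = some (some mhi) := by
        rw [hmiddef, hsplit]
        simp only [List.map_append, List.map_cons, List.map_nil, ← List.append_assoc,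
          List.getLast?_concat]
      have hmidne : mid ≠ [] := by rw [hmiddef]; simp
      have hstep : pvAStep mid total =
          (mid ++ (if total - mhi > 1 then [none] else [])) ++ [some total] := by
        simp only [pvAStep, PySem.List.pyGet?_neg_one, hlast, Option.getD_some]
        have : mid.isEmpty = false := by simp [hmidne]
        rw [this]
        split_ifs with hb hd hd <;> simp_all <;> omega
      rw [List.foldl_cons, List.foldl_nil, hstep, hmiddef]
      have e1 : (mlo < mhi + 1 ∧ mlo - 1 > 1) ↔ 2 < mlo := by omega
      have e2 : ((total : Int) - mhi > 1) ↔ mhi < total - 1 := by omega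
      simp only [e1, e2]
    · -- empty middle: pages = [1, total]
      rw [if_neg hm, if_neg hm]
      have ht : (total : Int) - 1 > 1 := by omega
      have h2 : pvAStep [some 1] total = [some 1, none, some total] := by
        simp [pvAStep, PySem.List.pyGet?_neg_one, ht]
      simp [List.foldl_cons, h1, h2]
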